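-- pv_equiv track=rewrite | github.com/ssurenr/Challenges | solution.py | solution
-- ===== SOURCE A (Python) =====
-- import math
--
-- def solution(N):
--     # write your code in Python 3.6
--
--     str_n = str(N)
--     length = len(str_n)
--
--     digit_count = {}
--
--     for number in str_n:
--         if number in digit_count:
--             digit_count[number] += 1
--         else:
--             digit_count[number] = 1
--
--     zeros = 0
--
--     if '0' in digit_count.keys():
--         zeros = digit_count['0']
--
--     numerator = (length - zeros) * math.factorial(length - 1)
--
--     denominator = 1
--     for digit in digit_count.keys():
--         if digit_count[digit] > 1:
--             denominator *= math.factorial(digit_count[digit])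
--
--     combinations = numerator // denominator
--
--     return combinations
-- ===== SOURCE B (Python) =====
-- import math
--
--
-- def solution(N):
--     # total permutations minus those with a leading zero, via the multinomial
--     # closed form; digits are counted with list.count over the distinct chars.
--     chars = list(str(N))
--     L = len(chars)
--     digits = set(chars)
--     denom = math.prod(math.factorial(chars.count(d)) for d in digits)
--     total = math.factorial(L) // denom
--     z = chars.count('0')
--     if z == 0:
--         return total
--     rest = math.prod(math.factorial(chars.count(d)) for d in digits if d != '0')
--     bad = math.factorial(L - 1) // (math.factorial(z - 1) * rest)
--     return total - bad
-- ===== Notes on version B (the rewrite author's own statement) =====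
-- stated objective: alternative
-- what changed: Replaces A's incremental counting dict and single fused quotient ((len-zeros)*(len-1)!)//prod by a set-of-chars + list.count tally and the inclusion-exclusion decomposition: total multinomial permutations minus those with a leading zero, each computed as its own exact factorial quotient.
import Mathlib
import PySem

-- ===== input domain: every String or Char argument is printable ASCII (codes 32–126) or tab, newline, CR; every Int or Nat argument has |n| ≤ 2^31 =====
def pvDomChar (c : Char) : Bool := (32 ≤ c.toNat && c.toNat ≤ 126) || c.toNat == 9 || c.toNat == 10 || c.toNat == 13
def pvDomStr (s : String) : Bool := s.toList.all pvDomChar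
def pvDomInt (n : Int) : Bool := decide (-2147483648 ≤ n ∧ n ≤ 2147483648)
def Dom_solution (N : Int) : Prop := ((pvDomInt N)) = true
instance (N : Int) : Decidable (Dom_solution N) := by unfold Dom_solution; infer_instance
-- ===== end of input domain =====

-- B rewrites A's fused quotient as total-minus-leading-zero multinomials, tallying digits with set+count instead of an incremental dict; same cost, different decomposition.

-- math.factorial; every argument passed by either port is ≥ 0 (string lengths and counts)
def pyFactorial (n : Int) : Int := (Nat.factorial n.toNat : Int)

-- ===== PORT A =====
def solution (N : Int) : Int :=
  let str_n := (PySem.Int.toStr N).toList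
  let length : Int := (str_n.length : Int)
  let digit_count : PySem.Dict Char Int :=
    str_n.foldl (fun d number =>
      if d.contains number then d.insert number (d.getD number 0 + 1)
      else d.insert number 1) PySem.Dict.empty
  let zeros : Int := if digit_count.contains '0' then digit_count.getD '0' 0 else 0
  let numerator := (length - zeros) * pyFactorial (length - 1)
  let denominator := digit_count.keys.foldl
    (fun den digit =>
      if digit_count.getD digit 0 > 1 then den * pyFactorial (digit_count.getD digit 0) else den) 1
  PySem.Int.floordiv numerator denominator

-- ===== PORT B =====
def solution_alt (N : Int) : Int :=
  let chars := (PySem.Int.toStr N).toList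
  let L : Int := (chars.length : Int)
  let digits := PySem.Set.ofList chars
  let denom := (digits.map (fun d => pyFactorial ((chars.count d : Int)))).prod
  let total := PySem.Int.floordiv (pyFactorial L) denom
  let z : Int := (chars.count '0' : Int)
  if z = 0 then total
  else
    let rest := ((digits.filter (fun d => d != '0')).map
      (fun d => pyFactorial ((chars.count d : Int)))).prod
    let bad := PySem.Int.floordiv (pyFactorial (L - 1)) (pyFactorial (z - 1) * rest)
    total - bad

-- ===== PRECONDITION & SPEC =====
def Spec_solution (N : Int) (out : Int) : Prop := out = solution_alt N
instance (N : Int) (out : Int) : Decidable (Spec_solution N out) := by unfold Spec_solution; infer_instance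

-- ===== CLAIM (what is proved, stated in full; the proofs are below) =====
def Claim_equal_solution : Prop := ∀ (N : Int), Dom_solution N → Spec_solution N (solution N)

-- ===== LEMMAS AND PROOFS =====

-- str(N) is never empty
lemma toDigitsCore_ne_nil (b : Nat) : ∀ (fuel n : Nat) (ds : List Char), ds ≠ [] →
    Nat.toDigitsCore b fuel n ds ≠ [] := by
  intro fuel
  induction fuel with
  | zero => intro n ds h; simpa [Nat.toDigitsCore] using h
  | succ f ih =>
    intro n ds h
    simp only [Nat.toDigitsCore]
    split
    · simp
    · exact ih _ _ (by simp)

lemma toChars_ne_nil (N : Int) : (PySem.Int.toStr N).toList ≠ [] := by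
  rw [PySem.Int.toList_toStr]
  unfold PySem.Int.toChars
  split
  · simp
  · unfold Nat.toDigits
    simp only [Nat.toDigitsCore]
    split
    · simp
    · exact toDigitsCore_ne_nil _ _ _ _ (by simp)

-- A's dict-building loop is the counter loop
lemma counter_fun_eq :
    (fun (d : PySem.Dict Char Int) number =>
      if d.contains number then d.insert number (d.getD number 0 + 1)
      else d.insert number 1)
    = (fun (d : PySem.Dict Char Int) x => d.insert x (d.getD x 0 + 1)) := by
  funext d x
  by_cases h : d.contains x
  · simp [h]
  · simp only [h, Bool.false_eq_true, if_false]
    rw [PySem.Dict.getD_of_not_contains (h := by simpa using h)]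
    norm_num

-- A's denominator loop is the product of factorials over the keys
lemma foldl_if_mul_prod (c F : Char → Int) (h1 : ∀ d, ¬ c d > 1 → F d = 1) :
    ∀ (ds : List Char) (a : Int),
      ds.foldl (fun den d => if c d > 1 then den * F d else den) a = a * (ds.map F).prod := by
  intro ds
  induction ds with
  | nil => simp
  | cons x t ih =>
    intro a
    by_cases h : c x > 1
    · simp only [List.foldl_cons, h, if_pos, List.map_cons, List.prod_cons]
      rw [ih]; ring
    · simp only [List.foldl_cons, h, if_false, List.map_cons, List.prod_cons, h1 x h]
      rw [ih, one_mul]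

-- product of factorials of a list divides the factorial of its sum
lemma list_prod_factorial_dvd (l : List Nat) : (l.map Nat.factorial).prod ∣ (l.sum).factorial := by
  induction l with
  | nil => simp
  | cons x t ih =>
    simp only [List.map_cons, List.prod_cons, List.sum_cons]
    calc x.factorial * (t.map Nat.factorial).prod
        ∣ x.factorial * (t.sum).factorial := mul_dvd_mul_left _ ih
      _ ∣ (x + t.sum).factorial := Nat.factorial_mul_factorial_dvd_factorial_add _ _

-- sum of counts over the distinct elements is the length
lemma sum_counts_ofList (s : List Char) :
    ((PySem.Set.ofList s).map (fun d => s.count d)).sum = s.length := by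
  have hperm : (PySem.Set.ofList s : List Char).Perm s.dedup := by
    rw [List.perm_ext_iff_of_nodup (PySem.Set.nodup_ofList s) s.nodup_dedup]
    intro a
    rw [PySem.Set.mem_ofList, List.mem_dedup]
  calc ((PySem.Set.ofList s).map (fun d => s.count d)).sum
      = (s.dedup.map (fun d => s.count d)).sum := (hperm.map _).sum_eq
    _ = s.length := List.sum_map_count_dedup_eq_length s

-- splitting a nodup product / sum at the element '0'
lemma prod_split_zero (ds : List Char) (hnd : ds.Nodup) (hmem : '0' ∈ ds) (f : Char → Nat) :
    (ds.map f).prod = f '0' * ((ds.filter (fun d => d != '0')).map f).prod := by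
  have hperm : ds.Perm ('0' :: ds.erase '0') := List.perm_cons_erase hmem
  have hfe : ds.filter (fun d => d != '0') = ds.erase '0' := by
    rw [hnd.erase_eq_filter]
  rw [hfe, (hperm.map f).prod_eq, List.map_cons, List.prod_cons]

lemma sum_split_zero (ds : List Char) (hnd : ds.Nodup) (hmem : '0' ∈ ds) (f : Char → Nat) :
    (ds.map f).sum = f '0' + ((ds.filter (fun d => d != '0')).map f).sum := by
  have hperm : ds.Perm ('0' :: ds.erase '0') := List.perm_cons_erase hmem
  have hfe : ds.filter (fun d => d != '0') = ds.erase '0' := by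
    rw [hnd.erase_eq_filter]
  rw [hfe, (hperm.map f).sum_eq, List.map_cons, List.sum_cons]

-- the exact-division arithmetic core, over Nat, cast to Int
lemma nat_core (L z D P : Nat) (hz : 1 ≤ z) (hzL : z ≤ L) (hD0 : 0 < D)
    (hD : D ∣ L.factorial) (hDb : (z - 1).factorial * P ∣ (L - 1).factorial)
    (hDP : D = z.factorial * P) :
    ((((L - z) * (L - 1).factorial) / D : Nat) : Int) =
      ((L.factorial / D : Nat) : Int) -
        (((L - 1).factorial / ((z - 1).factorial * P) : Nat) : Int) := by
  obtain ⟨t, ht⟩ := hD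
  obtain ⟨b, hb⟩ := hDb
  have hL : 0 < L := lt_of_lt_of_le hz hzL
  have hzfac : z * (z - 1).factorial = z.factorial := Nat.mul_factorial_pred (by omega)
  have hDzb : D = z * ((z - 1).factorial * P) := by rw [hDP, ← hzfac]; ring
  have hLfac : L * (L - 1).factorial = L.factorial := Nat.mul_factorial_pred (by omega)
  have hDb' : D * b = z * (L - 1).factorial := by rw [hDzb, mul_assoc, ← hb]
  have hDt : D * t = L.factorial := ht.symm
  have hble : b ≤ t := by
    have h1 : D * b ≤ D * t := by
      rw [hDb', hDt, ← hLfac]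
      exact Nat.mul_le_mul_right _ hzL
    exact Nat.le_of_mul_le_mul_left h1 hD0
  have hkey : (L - z) * (L - 1).factorial = D * (t - b) := by
    rw [Nat.mul_sub, hDt, hDb', Nat.sub_mul, hLfac]
  have e1 : ((L - z) * (L - 1).factorial) / D = t - b := by
    rw [hkey, Nat.mul_div_cancel_left _ hD0]
  have e2 : L.factorial / D = t := by rw [← hDt, Nat.mul_div_cancel_left _ hD0]
  have hP0 : 0 < P := by
    rcases Nat.eq_zero_or_pos P with h | h
    · exfalso; rw [h, mul_zero] at hDP; omega
    · exact h
  have e3 : (L - 1).factorial / ((z - 1).factorial * P) = b := by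
    rw [hb, Nat.mul_div_cancel_left _ (Nat.mul_pos (Nat.factorial_pos _) hP0)]
  rw [e1, e2, e3, Nat.cast_sub hble]

-- the whole equality, generalized over the character list of str(N)
lemma main_eq (s : List Char) (hs : s ≠ []) :
    (let length : Int := (s.length : Int)
     let digit_count : PySem.Dict Char Int :=
       s.foldl (fun d number =>
         if d.contains number then d.insert number (d.getD number 0 + 1)
         else d.insert number 1) PySem.Dict.empty
     let zeros : Int := if digit_count.contains '0' then digit_count.getD '0' 0 else 0
     let numerator := (length - zeros) * pyFactorial (length - 1)
     let denominator := digit_count.keys.foldl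
       (fun den digit =>
         if digit_count.getD digit 0 > 1 then den * pyFactorial (digit_count.getD digit 0) else den) 1
     PySem.Int.floordiv numerator denominator) =
    (let L : Int := (s.length : Int)
     let digits := PySem.Set.ofList s
     let denom := (digits.map (fun d => pyFactorial ((s.count d : Int)))).prod
     let total := PySem.Int.floordiv (pyFactorial L) denom
     let z : Int := (s.count '0' : Int)
     if z = 0 then total
     else
       let rest := ((digits.filter (fun d => d != '0')).map
         (fun d => pyFactorial ((s.count d : Int)))).prod
       let bad := PySem.Int.floordiv (pyFactorial (L - 1)) (pyFactorial (z - 1) * rest)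
       total - bad) := by
  have hL : 0 < s.length := List.length_pos_iff.mpr hs
  have hzL : s.count '0' ≤ s.length := List.count_le_length
  set ds : List Char := PySem.Set.ofList s with hds
  set Dn : Nat := (ds.map (fun d => (s.count d).factorial)).prod with hDn
  set Pn : Nat := ((ds.filter (fun d => d != '0')).map (fun d => (s.count d).factorial)).prod with hPn
  -- the dict is the counter
  have hdict : s.foldl (fun d number =>
      if d.contains number then d.insert number (d.getD number 0 + 1)
      else d.insert number 1) PySem.Dict.empty = PySem.Dict.counter s := by
    rw [counter_fun_eq]
    exact PySem.Dict.foldl_insert_getD_add_one_eq_counter s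
  simp only [hdict]
  -- zeros is the count of '0'
  have hzeros : (if (PySem.Dict.counter s).contains '0'
      then (PySem.Dict.counter s).getD '0' 0 else 0) = ((s.count '0' : Nat) : Int) := by
    by_cases h : '0' ∈ s
    · simp [PySem.Dict.contains_counter, PySem.Dict.getD_counter, h]
    · simp [PySem.Dict.contains_counter, h, List.count_eq_zero_of_not_mem h]
  -- casts of pyFactorial
  have hfact : ∀ n : Nat, pyFactorial ((n : Nat) : Int) = ((n.factorial : Nat) : Int) := by
    intro n; simp [pyFactorial]
  have hfact1 : pyFactorial ((s.length : Int) - 1) = (((s.length - 1).factorial : Nat) : Int) := by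
    have : ((s.length : Int) - 1) = (((s.length - 1 : Nat) : Nat) : Int) := by omega
    rw [this, hfact]
  -- the denominator loop is the product
  have hden : (PySem.Dict.counter s).keys.foldl
      (fun den digit =>
        if (PySem.Dict.counter s).getD digit 0 > 1
        then den * pyFactorial ((PySem.Dict.counter s).getD digit 0) else den) 1
      = ((Dn : Nat) : Int) := by
    simp only [PySem.Dict.getD_counter, PySem.Dict.keys_counter]
    have hside : ∀ d : Char, ¬ ((s.count d : Nat) : Int) > 1 → pyFactorial ((s.count d : Nat) : Int) = 1 := by
      intro d hd
      have hc : ((s.count d : Nat) : Int) ≤ 1 := Int.not_lt.mp hd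
      have hc' : s.count d ≤ 1 := by exact_mod_cast hc
      rcases Nat.le_one_iff_eq_zero_or_eq_one.mp hc' with h | h <;>
        simp [pyFactorial, h]
    rw [foldl_if_mul_prod (fun d => ((s.count d : Nat) : Int))
      (fun d => pyFactorial ((s.count d : Nat) : Int)) hside ds 1, one_mul]
    rw [hDn, Nat.cast_list_prod, List.map_map]
    exact congrArg List.prod (List.map_congr_left (fun a _ => hfact _))
  have hdenB : (ds.map (fun d => pyFactorial ((s.count d : Nat) : Int))).prod
      = ((Dn : Nat) : Int) := by
    rw [hDn, Nat.cast_list_prod, List.map_map]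
    exact congrArg List.prod (List.map_congr_left (fun a _ => hfact _))
  have hrest : ((ds.filter (fun d => d != '0')).map
      (fun d => pyFactorial ((s.count d : Nat) : Int))).prod = ((Pn : Nat) : Int) := by
    rw [hPn, Nat.cast_list_prod, List.map_map]
    exact congrArg List.prod (List.map_congr_left (fun a _ => hfact _))
  have hdvd : Dn ∣ (s.length).factorial := by
    have := list_prod_factorial_dvd (ds.map (fun d => s.count d))
    rw [List.map_map, sum_counts_ofList s] at this
    exact this
  have hD0 : 0 < Dn := List.prod_pos (by
    intro x hx
    simp only [List.mem_map] at hx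
    obtain ⟨d, _, rfl⟩ := hx
    exact Nat.factorial_pos _)
  by_cases hz : s.count '0' = 0
  · -- no zero digit: both sides are L!/Dn
    simp only [hzeros, hz, Nat.cast_zero, sub_zero, if_true]
    rw [hfact1, hden, hdenB, hfact, ← Nat.cast_mul,
      PySem.Int.floordiv_natCast, PySem.Int.floordiv_natCast]
    congr 2
    exact Nat.mul_factorial_pred (by omega)
  · -- there is a zero digit
    have hz1 : 1 ≤ s.count '0' := Nat.one_le_iff_ne_zero.mpr hz
    have hmem : '0' ∈ ds := (PySem.Set.mem_ofList s '0').mpr (List.count_pos_iff.mp hz1)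
    have hnd : ds.Nodup := PySem.Set.nodup_ofList s
    simp only [hzeros]
    rw [if_neg (by exact_mod_cast hz)]
    have hnum : ((s.length : Int) - ((s.count '0' : Nat) : Int))
        = (((s.length - s.count '0' : Nat) : Nat) : Int) := by omega
    have hz1' : ((s.count '0' : Nat) : Int) - 1 = (((s.count '0' - 1 : Nat) : Nat) : Int) := by
      omega
    rw [hfact1, hden, hdenB, hrest, hfact, hnum, hz1', hfact, ← Nat.cast_mul, ← Nat.cast_mul,
      PySem.Int.floordiv_natCast, PySem.Int.floordiv_natCast, PySem.Int.floordiv_natCast]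
    have hDb : (s.count '0' - 1).factorial * Pn ∣ (s.length - 1).factorial := by
      have hsum : (ds.map (fun d => s.count d)).sum = s.length := sum_counts_ofList s
      have hsplit := sum_split_zero ds hnd hmem (fun d => s.count d)
      have hrestsum : ((ds.filter (fun d => d != '0')).map (fun d => s.count d)).sum
          = s.length - s.count '0' := by omega
      have hdv := list_prod_factorial_dvd
        ((s.count '0' - 1) :: (ds.filter (fun d => d != '0')).map (fun d => s.count d))
      rw [List.map_cons, List.prod_cons, List.sum_cons, List.map_map, hrestsum] at hdv
      have harg : s.count '0' - 1 + (s.length - s.count '0') = s.length - 1 := by omega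
      rw [harg] at hdv
      exact hdv
    have hDP : Dn = (s.count '0').factorial * Pn := by
      rw [hDn, hPn]
      exact prod_split_zero ds hnd hmem _
    exact nat_core s.length (s.count '0') Dn Pn hz1 hzL hD0 hdvd hDb hDP

theorem solution_spec : Claim_equal_solution := by
  intro N _
  unfold Spec_solution solution solution_alt
  exact main_eq ((PySem.Int.toStr N).toList) (toChars_ne_nil N)
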